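-- pv_equiv track=rewrite | github.com/oridwan/HT-GenDFT | origin_flow/reset_failed_to_relax.py | find_failed_structures
-- ===== SOURCE A (Python) =====
-- def find_failed_structures(data):
--     """Find all structures in failed states."""
--     sc_failed = []
--     elf_failed = []
--     parchg_failed = []
--
--     for struct_id, sdata in data['structures'].items():
--         state = sdata.get('state')
--         if state == 'SC_FAILED':
--             sc_failed.append(struct_id)
--         elif state == 'ELF_FAILED':
--             elf_failed.append(struct_id)
--         elif state == 'PARCHG_FAILED':
--             parchg_failed.append(struct_id)
--
--     return {
--         'sc_failed': sorted(sc_failed),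
--         'elf_failed': sorted(elf_failed),
--         'parchg_failed': sorted(parchg_failed),
--         'all_failed': sorted(sc_failed + elf_failed + parchg_failed)
--     }
-- ===== SOURCE B (Python) =====
-- def find_failed_structures(data):
--     """Find all structures in failed states."""
--     failed = sorted(
--         ((sid, sdata) for sid, sdata in data['structures'].items()
--          if sdata.get('state') in ('SC_FAILED', 'ELF_FAILED', 'PARCHG_FAILED')),
--         key=lambda p: p[0])
--     return {
--         'sc_failed': [sid for sid, sdata in failed if sdata.get('state') == 'SC_FAILED'],
--         'elf_failed': [sid for sid, sdata in failed if sdata.get('state') == 'ELF_FAILED'],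
--         'parchg_failed': [sid for sid, sdata in failed if sdata.get('state') == 'PARCHG_FAILED'],
--         'all_failed': [sid for sid, _ in failed],
--     }
-- ===== Notes on version B (the rewrite author's own statement) =====
-- stated objective: alternative
-- what changed: B inverts A's dataflow: it first computes the sorted union of all failed entries (one filter + one sort), then derives each of the three per-state lists by filtering that single sorted union, whereas A builds the three group lists in a loop, sorts each of the four collections, and forms the union by concatenation.
import Mathlib
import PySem

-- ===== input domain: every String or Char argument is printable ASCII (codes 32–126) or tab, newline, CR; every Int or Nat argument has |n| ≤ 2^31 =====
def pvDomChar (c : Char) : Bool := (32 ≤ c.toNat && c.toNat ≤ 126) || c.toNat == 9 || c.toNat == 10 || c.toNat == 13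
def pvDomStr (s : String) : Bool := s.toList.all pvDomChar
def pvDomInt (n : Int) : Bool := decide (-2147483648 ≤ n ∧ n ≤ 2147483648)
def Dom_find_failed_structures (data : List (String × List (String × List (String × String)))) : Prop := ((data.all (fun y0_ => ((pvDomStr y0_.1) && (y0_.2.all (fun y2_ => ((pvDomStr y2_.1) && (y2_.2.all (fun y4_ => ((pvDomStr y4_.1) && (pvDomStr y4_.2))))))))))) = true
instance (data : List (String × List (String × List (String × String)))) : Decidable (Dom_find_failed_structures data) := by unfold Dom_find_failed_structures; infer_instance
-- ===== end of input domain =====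

-- B inverts A's dataflow: it computes the sorted union of failed entries first (one filter + one
-- sort) and derives the three per-state lists from that single sorted union; A builds the three
-- group lists in a loop, sorts each, and concatenates for the union (objective: alternative).

-- ===== PORT A =====
-- sdata.get('state')
def pvStateOf (sdata : List (String × String)) : Option String :=
  PySem.Dict.get? (PySem.Dict.mk sdata) "state"

-- the for-loop of A: state (sc_failed, elf_failed, parchg_failed)
def pvLoopA (items : List (String × List (String × String)))
    (acc : List String × List String × List String) :
    List String × List String × List String :=
  match items with
  | [] => acc
  | kv :: rest =>
    let state := pvStateOf kv.2
    if state == some "SC_FAILED" then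
      pvLoopA rest (acc.1 ++ [kv.1], acc.2.1, acc.2.2)
    else if state == some "ELF_FAILED" then
      pvLoopA rest (acc.1, acc.2.1 ++ [kv.1], acc.2.2)
    else if state == some "PARCHG_FAILED" then
      pvLoopA rest (acc.1, acc.2.1, acc.2.2 ++ [kv.1])
    else
      pvLoopA rest acc

def find_failed_structures (data : List (String × List (String × List (String × String)))) : List (String × List String) :=
  match PySem.Dict.get? (PySem.Dict.mk data) "structures" with
  | none => []   -- KeyError in Python: excluded by Pre_
  | some structures =>
    let r := pvLoopA structures ([], [], [])
    [("sc_failed", PySem.List.sorted r.1 (fun x => x) false),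
     ("elf_failed", PySem.List.sorted r.2.1 (fun x => x) false),
     ("parchg_failed", PySem.List.sorted r.2.2 (fun x => x) false),
     ("all_failed", PySem.List.sorted (r.1 ++ r.2.1 ++ r.2.2) (fun x => x) false)]

-- ===== PORT B =====
-- sdata.get('state') in ('SC_FAILED', 'ELF_FAILED', 'PARCHG_FAILED')
def pvIsFailed (kv : String × List (String × String)) : Bool :=
  pvStateOf kv.2 == some "SC_FAILED" || pvStateOf kv.2 == some "ELF_FAILED" ||
    pvStateOf kv.2 == some "PARCHG_FAILED"

def find_failed_structures_alt (data : List (String × List (String × List (String × String)))) : List (String × List String) :=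
  match PySem.Dict.get? (PySem.Dict.mk data) "structures" with
  | none => []   -- KeyError in Python: excluded by Pre_
  | some structures =>
    -- failed = sorted((sid, sdata) for … if state in (...), key=lambda p: p[0])
    let failed := PySem.List.sorted (structures.filter pvIsFailed) (fun p => p.1) false
    [("sc_failed", (failed.filter (fun p => pvStateOf p.2 == some "SC_FAILED")).map Prod.fst),
     ("elf_failed", (failed.filter (fun p => pvStateOf p.2 == some "ELF_FAILED")).map Prod.fst),
     ("parchg_failed", (failed.filter (fun p => pvStateOf p.2 == some "PARCHG_FAILED")).map Prod.fst),
     ("all_failed", failed.map Prod.fst)]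

-- ===== PRECONDITION & SPEC =====
-- Pre_ excludes exactly the inputs where data has no 'structures' key, on which Python A raises KeyError.
def Pre_find_failed_structures (data : List (String × List (String × List (String × String)))) : Prop :=
  "structures" ∈ data.map Prod.fst
instance (data : List (String × List (String × List (String × String)))) : Decidable (Pre_find_failed_structures data) := by unfold Pre_find_failed_structures; infer_instance

def pvWitness_find_failed_structures : (List (String × List (String × List (String × String)))) :=
  [("structures", [("s2", [("state", "SC_FAILED")]), ("s1", [("state", "ELF_FAILED")])])]

def Spec_find_failed_structures (data : List (String × List (String × List (String × String)))) (out : List (String × List String)) : Prop := out = find_failed_structures_alt data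
instance (data : List (String × List (String × List (String × String)))) (out : List (String × List String)) : Decidable (Spec_find_failed_structures data out) := by unfold Spec_find_failed_structures; infer_instance

-- ===== CLAIM (what is proved, stated in full; the proofs are below) =====
def Claim_equal_find_failed_structures : Prop := ∀ (data : List (String × List (String × List (String × String)))), Dom_find_failed_structures data → Pre_find_failed_structures data → Spec_find_failed_structures data (find_failed_structures data)

-- ===== LEMMAS AND PROOFS =====

def pvIsSC (kv : String × List (String × String)) : Bool := pvStateOf kv.2 == some "SC_FAILED"
def pvIsELF (kv : String × List (String × String)) : Bool := pvStateOf kv.2 == some "ELF_FAILED"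
def pvIsPAR (kv : String × List (String × String)) : Bool := pvStateOf kv.2 == some "PARCHG_FAILED"

lemma pvSC_excl (kv : String × List (String × String)) (h : pvIsSC kv = true) :
    pvIsELF kv = false ∧ pvIsPAR kv = false := by
  simp [pvIsSC] at h
  simp [pvIsELF, pvIsPAR, h]

lemma pvELF_excl (kv : String × List (String × String)) (h : pvIsELF kv = true) :
    pvIsSC kv = false ∧ pvIsPAR kv = false := by
  simp [pvIsELF] at h
  simp [pvIsSC, pvIsPAR, h]

lemma pvPAR_excl (kv : String × List (String × String)) (h : pvIsPAR kv = true) :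
    pvIsSC kv = false ∧ pvIsELF kv = false := by
  simp [pvIsPAR] at h
  simp [pvIsSC, pvIsELF, h]

lemma pvLoopA_eq (l : List (String × List (String × String)))
    (a b c : List String) :
    pvLoopA l (a, b, c) =
      (a ++ (l.filter pvIsSC).map Prod.fst,
       b ++ (l.filter pvIsELF).map Prod.fst,
       c ++ (l.filter pvIsPAR).map Prod.fst) := by
  induction l generalizing a b c with
  | nil => simp [pvLoopA]
  | cons kv t ih =>
    rw [pvLoopA]
    by_cases h1 : pvIsSC kv
    · obtain ⟨h2, h3⟩ := pvSC_excl kv h1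
      have hr1 : (pvStateOf kv.2 == some "SC_FAILED") = true := h1
      simp [hr1, ih, h1, h2, h3]
    · by_cases h2 : pvIsELF kv
      · obtain ⟨h1', h3⟩ := pvELF_excl kv h2
        have hr1 : ¬(pvStateOf kv.2 == some "SC_FAILED") = true := h1
        have hr2 : (pvStateOf kv.2 == some "ELF_FAILED") = true := h2
        simp [hr1, hr2, ih, h1', h2, h3]
      · by_cases h3 : pvIsPAR kv
        · obtain ⟨h1', h2'⟩ := pvPAR_excl kv h3
          have hr1 : ¬(pvStateOf kv.2 == some "SC_FAILED") = true := h1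
          have hr2 : ¬(pvStateOf kv.2 == some "ELF_FAILED") = true := h2
          have hr3 : (pvStateOf kv.2 == some "PARCHG_FAILED") = true := h3
          simp [hr1, hr2, hr3, ih, h1', h2', h3]
        · have hr1 : ¬(pvStateOf kv.2 == some "SC_FAILED") = true := h1
          have hr2 : ¬(pvStateOf kv.2 == some "ELF_FAILED") = true := h2
          have hr3 : ¬(pvStateOf kv.2 == some "PARCHG_FAILED") = true := h3
          simp [hr1, hr2, hr3, ih, Bool.eq_false_iff.mpr h1, Bool.eq_false_iff.mpr h2, Bool.eq_false_iff.mpr h3]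

-- the three mutually exclusive partitions concatenated are a permutation of the union filter
lemma pvPerm3 (l : List (String × List (String × String))) :
    (l.filter pvIsSC ++ l.filter pvIsELF ++ l.filter pvIsPAR).Perm (l.filter pvIsFailed) := by
  induction l with
  | nil => simp
  | cons kv t ih =>
    by_cases h1 : pvIsSC kv
    · obtain ⟨h2, h3⟩ := pvSC_excl kv h1
      have hf : pvIsFailed kv = true := by
        simp only [pvIsSC] at h1; simp [pvIsFailed, h1]
      simp only [List.filter_cons, h1, h2, h3, hf, Bool.false_eq_true, if_false, if_true,
        List.cons_append]
      exact ih.cons kv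
    · by_cases h2 : pvIsELF kv
      · obtain ⟨h1', h3⟩ := pvELF_excl kv h2
        have hf : pvIsFailed kv = true := by
          simp only [pvIsELF] at h2; simp [pvIsFailed, h2]
        simp only [List.filter_cons, h1', h2, h3, hf, Bool.false_eq_true, if_false, if_true]
        have hshape : t.filter pvIsSC ++ (kv :: t.filter pvIsELF) ++ t.filter pvIsPAR
            = t.filter pvIsSC ++ kv :: (t.filter pvIsELF ++ t.filter pvIsPAR) := by
          simp
        rw [hshape]
        refine List.Perm.trans List.perm_middle (List.Perm.cons kv ?_)
        rw [← List.append_assoc]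
        exact ih
      · by_cases h3 : pvIsPAR kv
        · obtain ⟨h1', h2'⟩ := pvPAR_excl kv h3
          have hf : pvIsFailed kv = true := by
            simp only [pvIsPAR] at h3; simp [pvIsFailed, h3]
          simp only [List.filter_cons, h1', h2', h3, hf, Bool.false_eq_true, if_false, if_true]
          exact List.Perm.trans List.perm_middle (List.Perm.cons kv ih)
        · have hf : pvIsFailed kv = false := by
            simp only [pvIsSC, Bool.not_eq_true] at h1
            simp only [pvIsELF, Bool.not_eq_true] at h2
            simp only [pvIsPAR, Bool.not_eq_true] at h3
            simp [pvIsFailed, h1, h2, h3]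
          simpa [List.filter_cons, Bool.eq_false_iff.mpr h1, Bool.eq_false_iff.mpr h2,
            Bool.eq_false_iff.mpr h3, hf] using ih

-- each per-state predicate implies membership in the failed union
lemma pvFilter_failed_absorb (l : List (String × List (String × String)))
    (p : String × List (String × String) → Bool)
    (himp : ∀ kv, p kv = true → pvIsFailed kv = true) :
    (l.filter pvIsFailed).filter p = l.filter p := by
  induction l with
  | nil => rfl
  | cons kv t ih =>
    by_cases hp : p kv
    · have hf := himp kv hp
      simp [hf, hp, ih]
    · by_cases hf : pvIsFailed kv
      · simp [hf, Bool.eq_false_iff.mpr hp, ih]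
      · simp [Bool.eq_false_iff.mpr hf, Bool.eq_false_iff.mpr hp, ih]

-- B's per-state list = A's sorted per-state key list: filtering the key-sorted failed union by a
-- state and taking keys IS Python's sorted() of the keys of the entries in that state
lemma pvGroup_eq (structures : List (String × List (String × String)))
    (p : String × List (String × String) → Bool)
    (himp : ∀ kv, p kv = true → pvIsFailed kv = true) :
    PySem.List.sorted ((structures.filter p).map Prod.fst) (fun x => x) false =
      ((PySem.List.sorted (structures.filter pvIsFailed) (fun kv => kv.1) false).filter p).map
        Prod.fst := by
  apply PySem.List.sorted_id_eq_of_perm_of_pairwise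
  · have hperm := ((PySem.List.sorted_perm (structures.filter pvIsFailed)
      (fun kv => kv.1) false).filter p).map Prod.fst
    rwa [pvFilter_failed_absorb structures p himp] at hperm
  · have hp : (PySem.List.sorted (structures.filter pvIsFailed) (fun kv => kv.1) false).Pairwise
        (fun a b => a.1 ≤ b.1) :=
      PySem.List.sorted_pairwise (structures.filter pvIsFailed) (fun kv => kv.1)
    exact List.pairwise_map.mpr (hp.sublist List.filter_sublist)

theorem find_failed_structures_spec : Claim_equal_find_failed_structures := by
  intro data _ hpre
  unfold Spec_find_failed_structures
  unfold find_failed_structures find_failed_structures_alt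
  cases hs : PySem.Dict.get? (PySem.Dict.mk data) "structures" with
  | none =>
    exfalso
    rw [PySem.Dict.get?_eq_none_iff_not_mem_keys] at hs
    unfold Pre_find_failed_structures at hpre
    obtain ⟨a, ha, hfst⟩ := List.mem_map.mp hpre
    exact hs (by simpa [PySem.Dict.keys_mk, ← hfst] using List.mem_map_of_mem ha (f := Prod.fst))
  | some structures =>
    have e1 := pvGroup_eq structures pvIsSC
      (fun kv h => by simp only [pvIsSC] at h; simp [pvIsFailed, h])
    have e2 := pvGroup_eq structures pvIsELF
      (fun kv h => by simp only [pvIsELF] at h; simp [pvIsFailed, h])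
    have e3 := pvGroup_eq structures pvIsPAR
      (fun kv h => by simp only [pvIsPAR] at h; simp [pvIsFailed, h])
    have e4 : PySem.List.sorted
        ((structures.filter pvIsSC).map Prod.fst ++ (structures.filter pvIsELF).map Prod.fst ++
          (structures.filter pvIsPAR).map Prod.fst) (fun x => x) false =
        (PySem.List.sorted (structures.filter pvIsFailed) (fun kv => kv.1) false).map Prod.fst := by
      apply PySem.List.sorted_id_eq_of_perm_of_pairwise
      · have p1 : ((PySem.List.sorted (structures.filter pvIsFailed) (fun kv => kv.1) false).map
            Prod.fst).Perm ((structures.filter pvIsFailed).map Prod.fst) :=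
          (PySem.List.sorted_perm (structures.filter pvIsFailed) (fun kv => kv.1) false).map
            Prod.fst
        have p2 : ((structures.filter pvIsFailed).map Prod.fst).Perm
            ((structures.filter pvIsSC ++ structures.filter pvIsELF ++
              structures.filter pvIsPAR).map Prod.fst) :=
          ((pvPerm3 structures).symm).map Prod.fst
        simpa [List.map_append] using p1.trans p2
      · have hp : (PySem.List.sorted (structures.filter pvIsFailed) (fun kv => kv.1) false).Pairwise
            (fun a b => a.1 ≤ b.1) :=
          PySem.List.sorted_pairwise (structures.filter pvIsFailed) (fun kv => kv.1)
        exact List.pairwise_map.mpr hp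
    simp only [pvLoopA_eq, List.nil_append]
    rw [e1, e2, e3, e4]
    rfl
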